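-- pv_equiv track=rewrite | github.com/dekuNukem/duckyPad | resources/duckyscript 1 fw and app/duckyscript1/ds_syntax_check.py | parse_mouse
-- ===== SOURCE A (Python) =====
-- cmd_LMOUSE = "LMOUSE"
--
-- cmd_RMOUSE = "RMOUSE"
--
-- cmd_MMOUSE = "MMOUSE"
--
-- cmd_MOUSE_MOVE = "MOUSE_MOVE"
--
-- cmd_MOUSE_WHEEL = "MOUSE_WHEEL"
--
-- mouse_commands = [cmd_LMOUSE, cmd_RMOUSE, cmd_MMOUSE, cmd_MOUSE_MOVE, cmd_MOUSE_WHEEL]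
--
-- PARSE_OK = 0
--
-- PARSE_ERROR = 1
--
-- def parse_mouse(ducky_line):
-- 	mouse_command_list = [x for x in mouse_commands if x in ducky_line]
-- 	if len(mouse_command_list) != 1:
-- 		return PARSE_ERROR, 'Mouse command too many arguments'
-- 	this_mouse_command = mouse_command_list[0]
-- 	if this_mouse_command == cmd_LMOUSE:
-- 		return PARSE_OK, "Success"
-- 	elif this_mouse_command == cmd_RMOUSE:
-- 		return PARSE_OK, "Success"
-- 	elif this_mouse_command == cmd_MMOUSE:
-- 		return PARSE_OK, "Success"
-- 	elif this_mouse_command == cmd_MOUSE_MOVE: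
-- 		try:
-- 			x_amount = int(ducky_line.split(' ')[1])
-- 			y_amount = int(ducky_line.split(' ')[2])
-- 			if x_amount > 127 or x_amount < -127:
-- 				raise ValueError
-- 			if y_amount > 127 or y_amount < -127:
-- 				raise ValueError
-- 		except:
-- 			return PARSE_ERROR, 'MOUSE_MOVE value error: should be -127 to 127'
-- 		return PARSE_OK, "Success"
-- 	elif this_mouse_command == cmd_MOUSE_WHEEL:
-- 		try:
-- 			amount = int(ducky_line.split(' ')[1])
-- 			if amount > 127 or amount < -127:
-- 				raise ValueError
-- 		except:
-- 			return PARSE_ERROR, 'MOUSE_WHEEL value error: should be -127 to 127'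
-- 		return PARSE_OK, "Success"
-- 	return PARSE_ERROR, "Invalid mouse command"
-- ===== SOURCE B (Python) =====
-- mouse_commands = ["LMOUSE", "RMOUSE", "MMOUSE", "MOUSE_MOVE", "MOUSE_WHEEL"]
--
-- PARSE_OK = 0
-- PARSE_ERROR = 1
--
-- # spec table: command -> (argument positions to parse, error message)
-- _NUMERIC_SPEC = {
--     "MOUSE_MOVE": ([1, 2], 'MOUSE_MOVE value error: should be -127 to 127'),
--     "MOUSE_WHEEL": ([1], 'MOUSE_WHEEL value error: should be -127 to 127'),
-- }
--
-- def parse_mouse(ducky_line):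
--     found = [x for x in mouse_commands if x in ducky_line]
--     if len(found) != 1:
--         return PARSE_ERROR, 'Mouse command too many arguments'
--     spec = _NUMERIC_SPEC.get(found[0])
--     if spec is None:
--         return PARSE_OK, "Success"
--     positions, err = spec
--     words = ducky_line.split(' ')
--     try:
--         for i in positions:
--             if not -127 <= int(words[i]) <= 127:
--                 raise ValueError
--     except (ValueError, IndexError):
--         return PARSE_ERROR, err
--     return PARSE_OK, "Success"
-- ===== Notes on version B (the rewrite author's own statement) =====
-- stated objective: simpler
-- what changed: Replaces A's five-way elif chain with two unrolled try-blocks by a spec table mapping each numeric command to its argument positions and error message, validated by one parametric parsing loop.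
import Mathlib
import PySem

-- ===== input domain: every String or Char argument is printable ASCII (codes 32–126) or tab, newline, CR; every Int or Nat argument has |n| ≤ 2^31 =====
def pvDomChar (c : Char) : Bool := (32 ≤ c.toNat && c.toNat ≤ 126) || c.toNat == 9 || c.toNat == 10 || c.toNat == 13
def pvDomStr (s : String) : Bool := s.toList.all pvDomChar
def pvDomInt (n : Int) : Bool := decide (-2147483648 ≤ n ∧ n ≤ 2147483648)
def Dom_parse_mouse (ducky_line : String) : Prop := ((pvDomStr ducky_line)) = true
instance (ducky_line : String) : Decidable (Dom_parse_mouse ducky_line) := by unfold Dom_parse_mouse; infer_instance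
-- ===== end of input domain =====

-- B replaces A's per-command unrolled try-blocks by a spec table (command ↦ argument
-- positions + error message) driven by one parsing loop; objective: simpler.

def pvMouseCommands : List String :=
  ["LMOUSE", "RMOUSE", "MMOUSE", "MOUSE_MOVE", "MOUSE_WHEEL"]

-- s.split(' '): split? with the nonempty literal separator is always `some`, getD is exact
def pvSplitSp (s : String) : List String := (PySem.Str.split? s " ").getD []

-- ===== PORT A =====
def parse_mouse (ducky_line : String) : Int × String :=
  let mouse_command_list := pvMouseCommands.filter (fun x => PySem.Str.isIn x ducky_line)
  if mouse_command_list.length ≠ 1 then (1, "Mouse command too many arguments")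
  else
    let this_mouse_command := mouse_command_list.headD ""
    if this_mouse_command = "LMOUSE" then (0, "Success")
    else if this_mouse_command = "RMOUSE" then (0, "Success")
    else if this_mouse_command = "MMOUSE" then (0, "Success")
    else if this_mouse_command = "MOUSE_MOVE" then
      -- try-block: none (IndexError/ValueError) or an out-of-range value → except path
      match PySem.List.pyGet? (pvSplitSp ducky_line) 1 with
      | none => (1, "MOUSE_MOVE value error: should be -127 to 127")
      | some s1 =>
        match PySem.Int.ofStr? s1 with
        | none => (1, "MOUSE_MOVE value error: should be -127 to 127")
        | some x_amount =>
          match PySem.List.pyGet? (pvSplitSp ducky_line) 2 with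
          | none => (1, "MOUSE_MOVE value error: should be -127 to 127")
          | some s2 =>
            match PySem.Int.ofStr? s2 with
            | none => (1, "MOUSE_MOVE value error: should be -127 to 127")
            | some y_amount =>
              if x_amount > 127 ∨ x_amount < -127 then
                (1, "MOUSE_MOVE value error: should be -127 to 127")
              else if y_amount > 127 ∨ y_amount < -127 then
                (1, "MOUSE_MOVE value error: should be -127 to 127")
              else (0, "Success")
    else if this_mouse_command = "MOUSE_WHEEL" then
      match PySem.List.pyGet? (pvSplitSp ducky_line) 1 with
      | none => (1, "MOUSE_WHEEL value error: should be -127 to 127")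
      | some s1 =>
        match PySem.Int.ofStr? s1 with
        | none => (1, "MOUSE_WHEEL value error: should be -127 to 127")
        | some amount =>
          if amount > 127 ∨ amount < -127 then
            (1, "MOUSE_WHEEL value error: should be -127 to 127")
          else (0, "Success")
    else (1, "Invalid mouse command")

-- ===== PORT B =====
def pvNumericSpec : PySem.Dict String (List Int × String) :=
  PySem.Dict.ofList
    [("MOUSE_MOVE", ([1, 2], "MOUSE_MOVE value error: should be -127 to 127")),
     ("MOUSE_WHEEL", ([1], "MOUSE_WHEEL value error: should be -127 to 127"))]

-- the try/for loop of B: some () = all positions parse to -127..127, none = the except path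
def pvParsePositions (words : List String) : List Int → Option Unit
  | [] => some ()
  | i :: rest =>
    match PySem.List.pyGet? words i with
    | none => none
    | some w =>
      match PySem.Int.ofStr? w with
      | none => none
      | some v => if -127 ≤ v ∧ v ≤ 127 then pvParsePositions words rest else none

def parse_mouse_alt (ducky_line : String) : Int × String :=
  let found := pvMouseCommands.filter (fun x => PySem.Str.isIn x ducky_line)
  if found.length ≠ 1 then (1, "Mouse command too many arguments")
  else
    match pvNumericSpec.get? (found.headD "") with
    | none => (0, "Success")
    | some (positions, err) =>
      match pvParsePositions (pvSplitSp ducky_line) positions with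
      | none => (1, err)
      | some _ => (0, "Success")

-- ===== PRECONDITION & SPEC =====
def Spec_parse_mouse (ducky_line : String) (out : Int × String) : Prop := out = parse_mouse_alt ducky_line
instance (ducky_line : String) (out : Int × String) : Decidable (Spec_parse_mouse ducky_line out) := by unfold Spec_parse_mouse; infer_instance

-- ===== CLAIM (what is proved, stated in full; the proofs are below) =====
def Claim_equal_parse_mouse : Prop := ∀ (ducky_line : String), Dom_parse_mouse ducky_line → Spec_parse_mouse ducky_line (parse_mouse ducky_line)

-- ===== LEMMAS AND PROOFS =====

theorem pm_move_eq (parts : List String) :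
    (match PySem.List.pyGet? parts 1 with
      | none => ((1 : Int), "MOUSE_MOVE value error: should be -127 to 127")
      | some s1 =>
        match PySem.Int.ofStr? s1 with
        | none => (1, "MOUSE_MOVE value error: should be -127 to 127")
        | some x =>
          match PySem.List.pyGet? parts 2 with
          | none => (1, "MOUSE_MOVE value error: should be -127 to 127")
          | some s2 =>
            match PySem.Int.ofStr? s2 with
            | none => (1, "MOUSE_MOVE value error: should be -127 to 127")
            | some y =>
              if x > 127 ∨ x < -127 then (1, "MOUSE_MOVE value error: should be -127 to 127")
              else if y > 127 ∨ y < -127 then (1, "MOUSE_MOVE value error: should be -127 to 127")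
              else (0, "Success"))
    = (match pvParsePositions parts [1, 2] with
      | none => ((1 : Int), "MOUSE_MOVE value error: should be -127 to 127")
      | some _ => ((0 : Int), "Success")) := by
  rcases h1 : PySem.List.pyGet? parts 1 with _ | s1
  · simp [pvParsePositions, h1]
  rcases h2 : PySem.Int.ofStr? s1 with _ | x
  · simp [pvParsePositions, h1, h2]
  rcases h3 : PySem.List.pyGet? parts 2 with _ | s2
  · simp only [pvParsePositions, h1, h2, h3]
    split_ifs <;> rfl
  rcases h4 : PySem.Int.ofStr? s2 with _ | y
  · simp only [pvParsePositions, h1, h2, h3, h4]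
    split_ifs <;> rfl
  · simp only [pvParsePositions, h1, h2, h3, h4]
    split_ifs <;> first | rfl | omega

theorem pm_wheel_eq (parts : List String) :
    (match PySem.List.pyGet? parts 1 with
      | none => ((1 : Int), "MOUSE_WHEEL value error: should be -127 to 127")
      | some s1 =>
        match PySem.Int.ofStr? s1 with
        | none => (1, "MOUSE_WHEEL value error: should be -127 to 127")
        | some a =>
          if a > 127 ∨ a < -127 then (1, "MOUSE_WHEEL value error: should be -127 to 127")
          else (0, "Success"))
    = (match pvParsePositions parts [1] with
      | none => ((1 : Int), "MOUSE_WHEEL value error: should be -127 to 127")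
      | some _ => ((0 : Int), "Success")) := by
  rcases h1 : PySem.List.pyGet? parts 1 with _ | s1
  · simp [pvParsePositions, h1]
  rcases h2 : PySem.Int.ofStr? s1 with _ | a
  · simp [pvParsePositions, h1, h2]
  · simp only [pvParsePositions, h1, h2]
    split_ifs <;> first | rfl | omega

theorem pm_get_LMOUSE : pvNumericSpec.get? "LMOUSE" = none := by rfl
theorem pm_get_RMOUSE : pvNumericSpec.get? "RMOUSE" = none := by rfl
theorem pm_get_MMOUSE : pvNumericSpec.get? "MMOUSE" = none := by rfl
theorem pm_get_MOVE :
    pvNumericSpec.get? "MOUSE_MOVE" =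
      some ([1, 2], "MOUSE_MOVE value error: should be -127 to 127") := by rfl
theorem pm_get_WHEEL :
    pvNumericSpec.get? "MOUSE_WHEEL" =
      some ([1], "MOUSE_WHEEL value error: should be -127 to 127") := by rfl

-- ===== VERDICT (by name: the statement is the Claim_ definition above) =====
theorem parse_mouse_spec : Claim_equal_parse_mouse := by
  intro ducky_line _
  unfold Spec_parse_mouse parse_mouse parse_mouse_alt
  have hsub : ∀ c ∈ pvMouseCommands.filter (fun x => PySem.Str.isIn x ducky_line),
      c ∈ pvMouseCommands := fun c hc => List.mem_of_mem_filter hc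
  generalize hLdef : pvMouseCommands.filter (fun x => PySem.Str.isIn x ducky_line) = L at *
  by_cases hlen : L.length ≠ 1
  · simp [hlen]
  · rw [not_not] at hlen
    obtain ⟨c, rfl⟩ := List.length_eq_one_iff.mp hlen
    have hc : c ∈ pvMouseCommands := hsub c (List.mem_singleton_self c)
    simp only [pvMouseCommands, List.mem_cons, List.not_mem_nil, or_false] at hc
    rcases hc with rfl | rfl | rfl | rfl | rfl <;>
      simp [pm_get_LMOUSE, pm_get_RMOUSE, pm_get_MMOUSE, pm_get_MOVE, pm_get_WHEEL,
        pm_move_eq, pm_wheel_eq]
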